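-- pv_equiv track=rewrite | github.com/andreas778/mb | script.py | get_rgt
-- ===== SOURCE A (Python) =====
-- def get_rgt(arpt_data):
--     rgt = {}
--     rwy_ind = arpt_data.find('\nRWY')
--     while rwy_ind != -1:
--         rwy_end_ind = arpt_data.find('\n', rwy_ind+1)
--         if arpt_data.find('-', rwy_ind, rwy_ind+10) == -1 and arpt_data.find(':', rwy_ind, rwy_ind+10) != -1:
--             rwy_string = arpt_data[rwy_ind:rwy_end_ind]
--             rwy = rwy_string[(rwy_string.find(' ')+1):rwy_string.find(':')]
--             if rwy_string.find('Rgt tfc') != -1: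
--                 tfc = 'R'
--             else:
--                 tfc = ''
--             if rgt.get(rwy, -1) == -1:
--                 rgt[rwy] = {}
--                 rgt[rwy]['Rgt'] = tfc
--         rwy_ind = arpt_data.find('\nRWY', rwy_end_ind)
--
--     return rgt
-- ===== SOURCE B (Python) =====
-- def get_rgt(arpt_data):
--     rgt = {}
--     for i in range(len(arpt_data)):
--         if arpt_data[i:i + 4] == '\nRWY':
--             window = arpt_data[i:i + 10]
--             if '-' not in window and ':' in window:
--                 entry = arpt_data[i:arpt_data.find('\n', i + 1)]
--                 rwy = entry[entry.find(' ') + 1:entry.find(':')]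
--                 if rwy not in rgt:
--                     rgt[rwy] = {'Rgt': 'R' if 'Rgt tfc' in entry else ''}
--     return rgt
-- ===== Notes on version B (the rewrite author's own statement) =====
-- stated objective: simpler
-- what changed: A chases str.find jump indices in a while loop with a separately maintained line-end index; B is a single for-loop over every position of the text that treats a position as a runway line start when the four-character slice there equals the newline+RWY marker, using slice membership tests instead of A's range-bounded find calls and one dict-literal insertion instead of A's two-step insert.
import Mathlib
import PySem

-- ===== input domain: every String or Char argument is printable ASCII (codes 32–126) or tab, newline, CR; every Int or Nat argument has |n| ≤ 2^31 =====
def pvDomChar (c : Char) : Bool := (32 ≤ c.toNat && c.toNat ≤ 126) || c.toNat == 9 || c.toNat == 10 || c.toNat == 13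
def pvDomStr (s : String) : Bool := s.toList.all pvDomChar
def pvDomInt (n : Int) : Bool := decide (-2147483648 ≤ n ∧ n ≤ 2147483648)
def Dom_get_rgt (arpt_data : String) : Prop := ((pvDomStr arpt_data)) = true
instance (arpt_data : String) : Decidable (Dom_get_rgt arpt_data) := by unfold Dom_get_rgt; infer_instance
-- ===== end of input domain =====

-- B replaces A's find-driven jump scan by a single guarded left-to-right scan over every
-- position (same asymptotic cost, simpler loop); return values are proved identical.

-- the dict-of-dicts type both programs build ({rwy: {'Rgt': tfc}}), keys/values as char lists
def pvDictT : Type := PySem.Dict (List Char) (PySem.Dict (List Char) (List Char))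

-- ===== PORT A =====
-- the body of A's while loop after 'rwy_end_ind = ...' (rgt-updating part)
def pvBodyA (cs : List Char) (rwy_ind rwy_end_ind : Int) (rgt : pvDictT) : pvDictT :=
  if PySem.Chars.findFrom cs "-".toList rwy_ind (some (rwy_ind + 10)) = -1
      ∧ PySem.Chars.findFrom cs ":".toList rwy_ind (some (rwy_ind + 10)) ≠ -1 then
    let rwy_string := PySem.Chars.slice cs (some rwy_ind) (some rwy_end_ind)
    let rwy := PySem.Chars.slice rwy_string
        (some (PySem.Chars.find rwy_string " ".toList + 1))
        (some (PySem.Chars.find rwy_string ":".toList))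
    let tfc : List Char := if PySem.Chars.find rwy_string "Rgt tfc".toList ≠ -1 then "R".toList else "".toList
    -- 'rgt.get(rwy, -1) == -1': values are dicts, never -1, so this is a missing-key test
    if rgt.contains rwy = false then
      (rgt.insert rwy PySem.Dict.empty).insert rwy (PySem.Dict.empty.insert "Rgt".toList tfc)
    else rgt
  else rgt

-- A's while loop; fuel only makes the recursion total (the index strictly increases)
def pvLoopA (cs : List Char) : Nat → Int → pvDictT → pvDictT
  | 0, _, rgt => rgt
  | fuel + 1, rwy_ind, rgt =>
    if rwy_ind = -1 then rgt
    else
      let rwy_end_ind := PySem.Chars.findFrom cs "\n".toList (rwy_ind + 1)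
      pvLoopA cs fuel (PySem.Chars.findFrom cs "\nRWY".toList rwy_end_ind)
        (pvBodyA cs rwy_ind rwy_end_ind rgt)

def get_rgt (arpt_data : String) : List (String × List (String × String)) :=
  (pvLoopA arpt_data.toList (arpt_data.toList.length + 1)
      (PySem.Chars.find arpt_data.toList "\nRWY".toList) PySem.Dict.empty).items.map
    (fun p => (String.ofList p.1, p.2.items.map (fun q => (String.ofList q.1, String.ofList q.2))))

-- ===== PORT B =====
-- B's loop body: what one iteration 'for i in range(len(arpt_data))' does
def pvStepB (cs : List Char) (rgt : pvDictT) (i : Int) : pvDictT :=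
  if PySem.Chars.slice cs (some i) (some (i + 4)) = "\nRWY".toList then
    let window := PySem.Chars.slice cs (some i) (some (i + 10))
    if PySem.Chars.isIn "-".toList window = false ∧ PySem.Chars.isIn ":".toList window = true then
      let entry := PySem.Chars.slice cs (some i)
          (some (PySem.Chars.findFrom cs "\n".toList (i + 1)))
      let rwy := PySem.Chars.slice entry
          (some (PySem.Chars.find entry " ".toList + 1))
          (some (PySem.Chars.find entry ":".toList))
      if rgt.contains rwy = false then
        rgt.insert rwy (PySem.Dict.empty.insert "Rgt".toList
          (if PySem.Chars.isIn "Rgt tfc".toList entry then "R".toList else "".toList))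
      else rgt
    else rgt
  else rgt

def get_rgt_alt (arpt_data : String) : List (String × List (String × String)) :=
  ((PySem.List.pyRange 0 (arpt_data.toList.length : Int) 1).foldl (pvStepB arpt_data.toList)
      PySem.Dict.empty).items.map
    (fun p => (String.ofList p.1, p.2.items.map (fun q => (String.ofList q.1, String.ofList q.2))))

-- ===== PRECONDITION & SPEC =====
def Spec_get_rgt (arpt_data : String) (out : List (String × List (String × String))) : Prop := out = get_rgt_alt arpt_data
instance (arpt_data : String) (out : List (String × List (String × String))) : Decidable (Spec_get_rgt arpt_data out) := by unfold Spec_get_rgt; infer_instance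

-- ===== CLAIM (what is proved, stated in full; the proofs are below) =====
def Claim_equal_get_rgt : Prop := ∀ (arpt_data : String), Dom_get_rgt arpt_data → Spec_get_rgt arpt_data (get_rgt arpt_data)

-- ===== LEMMAS AND PROOFS =====

-- find returns -1 when the pattern is longer than the text
theorem pv_find_small (cs sub : List Char) (h : cs.length < sub.length) :
    PySem.Chars.find cs sub = -1 := by
  rw [PySem.Chars.find_eq_neg_one_iff]
  intro hinf
  exact absurd hinf.length_le (by omega)

-- Python find(sub, -1) is -1 for any pattern of length ≥ 2
theorem pv_findFrom_neg_one (cs sub : List Char) (h : 2 ≤ sub.length) :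
    PySem.Chars.findFrom cs sub (-1) = -1 := by
  unfold PySem.Chars.findFrom
  have hf : ∀ st : Int, 0 ≤ st → (cs.length : Int) - 1 ≤ st →
      PySem.Chars.find (List.drop st.toNat (List.take ((cs.length : Int)).toNat cs)) sub = -1 := by
    intro st h0 hle
    apply pv_find_small
    have h1 : (List.drop st.toNat (List.take ((cs.length : Int)).toNat cs)).length = 
        (List.take ((cs.length : Int)).toNat cs).length - st.toNat := List.length_drop ..
    have h2 : (List.take ((cs.length : Int)).toNat cs).length ≤ cs.length := by
      simpa using List.length_take_le ..
    omega
  dsimp only []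
  split_ifs <;> try rfl
  all_goals rename_i hr
  all_goals exact absurd (hf _ (by omega) (by omega)) hr

-- 'sub occurs in cs from position k on' as an existential over positions
theorem pv_infix_drop_iff (sub cs : List Char) (k : Nat) :
    sub <:+: cs.drop k ↔ ∃ p : Nat, k ≤ p ∧ sub <+: cs.drop p := by
  constructor
  · intro hinf
    obtain ⟨j, hj⟩ := (PySem.Chars.exists_prefix_drop_iff_isIn sub (cs.drop k)).2
      ((PySem.Chars.isIn_iff_infix sub (cs.drop k)).2 hinf)
    rw [List.drop_drop] at hj
    exact ⟨k + j, by omega, hj⟩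
  · rintro ⟨p, hkp, hp⟩
    have hj : sub <+: (cs.drop k).drop (p - k) := by
      rw [List.drop_drop, Nat.add_sub_cancel' hkp]
      exact hp
    exact (PySem.Chars.isIn_iff_infix sub (cs.drop k)).1
      ((PySem.Chars.exists_prefix_drop_iff_isIn sub (cs.drop k)).1 ⟨p - k, hj⟩)

-- two findFrom starts agree when they cut the match set identically
theorem pv_findFrom_congr (cs sub : List Char) (k₁ k₂ : Nat)
    (h₁ : k₁ ≤ cs.length) (h₂ : k₂ ≤ cs.length)
    (h : ∀ p : Nat, sub <+: cs.drop p → (k₁ ≤ p ↔ k₂ ≤ p)) :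
    PySem.Chars.findFrom cs sub (k₁ : Int) = PySem.Chars.findFrom cs sub (k₂ : Int) := by
  have himp : ∀ (a b : Nat), a ≤ cs.length → b ≤ cs.length →
      (∀ p : Nat, sub <+: cs.drop p → (b ≤ p → a ≤ p)) →
      PySem.Chars.findFrom cs sub (a : Int) = -1 → PySem.Chars.findFrom cs sub (b : Int) = -1 := by
    intro a b ha hb hab h1
    rw [PySem.Chars.findFrom_natCast_eq_neg_one_iff cs sub a ha, pv_infix_drop_iff] at h1
    rw [PySem.Chars.findFrom_natCast_eq_neg_one_iff cs sub b hb, pv_infix_drop_iff]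
    rintro ⟨p, hp, hpre⟩
    exact h1 ⟨p, hab p hpre hp, hpre⟩
  by_cases h1 : PySem.Chars.findFrom cs sub (k₁ : Int) = -1
  · rw [h1, himp k₁ k₂ h₁ h₂ (fun p hp hk => (h p hp).2 hk) h1]
  · have h2 : PySem.Chars.findFrom cs sub (k₂ : Int) ≠ -1 := by
      intro h2
      exact h1 (himp k₂ k₁ h₂ h₁ (fun p hp hk => (h p hp).1 hk) h2)
    obtain ⟨ha1, hb1, hc1⟩ := PySem.Chars.findFrom_natCast_spec cs sub k₁ h₁ h1
    obtain ⟨ha2, hb2, hc2⟩ := PySem.Chars.findFrom_natCast_spec cs sub k₂ h₂ h2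
    have hn1 : 0 ≤ PySem.Chars.findFrom cs sub (k₁ : Int) := le_trans (by positivity) ha1
    have hn2 : 0 ≤ PySem.Chars.findFrom cs sub (k₂ : Int) := le_trans (by positivity) ha2
    have hge1 : ¬ (PySem.Chars.findFrom cs sub (k₁ : Int)).toNat < (PySem.Chars.findFrom cs sub (k₂ : Int)).toNat := by
      intro hlt
      exact hc2 _ ((h _ hb1).1 (by omega)) hlt hb1
    have hge2 : ¬ (PySem.Chars.findFrom cs sub (k₂ : Int)).toNat < (PySem.Chars.findFrom cs sub (k₁ : Int)).toNat := by
      intro hlt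
      exact hc1 _ ((h _ hb2).2 (by omega)) hlt hb2
    omega

-- a fold over steps that all do nothing
theorem pv_foldl_id {α β : Type} (f : β → α → β) (l : List α)
    (h : ∀ i ∈ l, ∀ d, f d i = d) (d : β) : l.foldl f d = d := by
  induction l generalizing d with
  | nil => rfl
  | cons x xs ih => simpa [List.foldl, h x (by simp)] using ih (fun i hi d => h i (by simp [hi]) d) d

-- B's guard: the 4-char slice equals "\nRWY" iff the pattern starts at i
theorem pv_guard_iff (cs : List Char) (i : Nat) :
    PySem.Chars.slice cs (some (i : Int)) (some ((i : Int) + 4)) = "\nRWY".toList ↔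
      "\nRWY".toList <+: cs.drop i := by
  have h4 : ((i : Int) + 4) = ((i : Int) + ((4 : Nat) : Int)) := by norm_num
  rw [PySem.Chars.slice_eq_listSlice, h4, PySem.List.slice_natCast_add]
  have hl : ("\nRWY".toList).length = 4 := rfl
  rw [List.prefix_iff_eq_take, hl, eq_comm]

-- B skips positions where the pattern does not start
theorem pv_stepB_skip (cs : List Char) (i : Int) (hi : 0 ≤ i)
    (h : ¬ "\nRWY".toList <+: cs.drop i.toNat) (d : pvDictT) : pvStepB cs d i = d := by
  have hi' : (i : Int) = ((i.toNat : Nat) : Int) := (Int.toNat_of_nonneg hi).symm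
  simp only [pvStepB]
  rw [hi', if_neg (fun hc => h ((pv_guard_iff cs i.toNat).1 hc))]

-- range-bounded find is -1 iff the pattern misses the window slice
theorem pv_findRange_iff (cs sub : List Char) (k c : Nat) (hk : k ≤ cs.length)
    :
    PySem.Chars.findFrom cs sub (k : Int) (some ((k : Int) + ((c : Nat) : Int))) = -1 ↔
      ¬ sub <:+: (cs.drop k).take c := by
  have hkk : ((k : Int)).toNat = k := Int.toNat_natCast k
  have hnn : (((cs.length : Nat) : Int)).toNat = cs.length := Int.toNat_natCast _
  have hcc : ((k : Int) + ((c : Nat) : Int)).toNat = k + c := by omega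
  have hlistA : (cs.length : Int) < (k : Int) + ((c : Nat) : Int) →
      List.drop ((k : Int)).toNat (List.take (((cs.length : Nat) : Int)).toNat cs) =
        (cs.drop k).take c := by
    intro hnc
    rw [hkk, hnn, List.take_length, List.take_of_length_le (by simp; omega)]
  have hlistB : List.drop ((k : Int)).toNat (List.take (((k : Int) + ((c : Nat) : Int))).toNat cs) =
      (cs.drop k).take c := by
    rw [hkk, hcc, List.drop_take]
    congr 1
    omega
  unfold PySem.Chars.findFrom
  dsimp only []
  split_ifs with h1 h2 h3 h4 h5 h6 h7 h8
  all_goals try (exfalso; omega)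
  · rename_i hfind
    rw [hlistA h1] at hfind
    exact iff_of_true rfl ((PySem.Chars.find_eq_neg_one_iff _ _).1 hfind)
  · rename_i hfind
    rw [hlistA h1] at hfind ⊢
    have hinf := (PySem.Chars.find_ne_neg_one_iff _ sub).1 hfind
    have hge := PySem.Chars.neg_one_le_find ((cs.drop k).take c) sub
    exact iff_of_false (by omega) (fun hn => hn hinf)
  · rename_i hfind
    rw [hlistB] at hfind
    exact iff_of_true rfl ((PySem.Chars.find_eq_neg_one_iff _ _).1 hfind)
  · rename_i hfind
    rw [hlistB] at hfind ⊢
    have hinf := (PySem.Chars.find_ne_neg_one_iff _ sub).1 hfind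
    have hge := PySem.Chars.neg_one_le_find ((cs.drop k).take c) sub
    exact iff_of_false (by omega) (fun hn => hn hinf)

-- writing {} then ['Rgt'] = tfc is one insertion of the one-key dict
theorem pv_dict_ext {κ ν : Type} (d₁ d₂ : PySem.Dict κ ν) (h : d₁.items = d₂.items) : d₁ = d₂ := by
  cases d₁
  cases d₂
  cases h
  rfl

theorem pv_insert_insert {κ ν : Type} [BEq κ] [LawfulBEq κ] (d : PySem.Dict κ ν) (k : κ) (v v' : ν) :
    (d.insert k v).insert k v' = d.insert k v' := by
  apply pv_dict_ext
  rw [PySem.Dict.items_insert_of_contains _ _ (PySem.Dict.contains_insert_self d k v)]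
  by_cases hc : d.contains k
  · rw [PySem.Dict.items_insert_of_contains _ _ hc, PySem.Dict.items_insert_of_contains _ _ hc,
      List.map_map]
    apply List.map_congr_left
    intro p _
    by_cases hp : p.1 == k
    · simp [hp]
    · simp [hp]
  · have hc' : d.contains k = false := by simpa using hc
    have hne : ∀ p ∈ d.items, (p.1 == k) = false := by
      intro p hp
      cases hb : (p.1 == k)
      · rfl
      · exfalso
        have hk : p.1 ∈ d.keys := PySem.Dict.mem_keys_of_mem_items d hp
        rw [eq_of_beq hb] at hk
        rw [(PySem.Dict.contains_iff_mem_keys d k).2 hk] at hc'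
        simp at hc'
    rw [PySem.Dict.items_insert_of_not_contains _ _ hc',
      PySem.Dict.items_insert_of_not_contains _ _ hc', List.map_append]
    congr 1
    · conv_rhs => rw [← List.map_id d.items]
      apply List.map_congr_left
      intro p hp
      simp [hne p hp]
    · simp

-- at a match position the two loop bodies agree
theorem pv_step_eq_body (cs : List Char) (i : Nat) (hn : i ≤ cs.length)
    (hP : "\nRWY".toList <+: cs.drop i) (d : pvDictT) :
    pvStepB cs d (i : Int) =
      pvBodyA cs (i : Int) (PySem.Chars.findFrom cs "\n".toList ((i : Int) + 1)) d := by
  have h10 : ((i : Int) + 10) = ((i : Int) + ((10 : Nat) : Int)) := by norm_num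
  have hw : PySem.Chars.slice cs (some (i : Int)) (some ((i : Int) + 10)) = (cs.drop i).take 10 := by
    rw [PySem.Chars.slice_eq_listSlice, h10, PySem.List.slice_natCast_add]
  have hdash : (PySem.Chars.findFrom cs "-".toList (i : Int) (some ((i : Int) + 10)) = -1) ↔
      PySem.Chars.isIn "-".toList (PySem.Chars.slice cs (some (i : Int)) (some ((i : Int) + 10))) = false := by
    rw [hw, PySem.Chars.isIn_eq_false_iff, h10]
    exact pv_findRange_iff cs "-".toList i 10 hn
  have hcolon : (PySem.Chars.findFrom cs ":".toList (i : Int) (some ((i : Int) + 10)) ≠ -1) ↔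
      PySem.Chars.isIn ":".toList (PySem.Chars.slice cs (some (i : Int)) (some ((i : Int) + 10))) = true := by
    rw [hw, PySem.Chars.isIn_iff_infix, h10]
    exact (not_congr (pv_findRange_iff cs ":".toList i 10 hn)).trans not_not
  simp only [pvStepB, pvBodyA]
  rw [if_pos ((pv_guard_iff cs i).2 hP)]
  by_cases hC : PySem.Chars.findFrom cs "-".toList (i : Int) (some ((i : Int) + 10)) = -1 ∧
      PySem.Chars.findFrom cs ":".toList (i : Int) (some ((i : Int) + 10)) ≠ -1
  · rw [if_pos ⟨hdash.1 hC.1, hcolon.1 hC.2⟩, if_pos hC]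
    rw [pv_insert_insert]
    have htfc : (if PySem.Chars.find (PySem.Chars.slice cs (some (i : Int))
          (some (PySem.Chars.findFrom cs "\n".toList ((i : Int) + 1)))) "Rgt tfc".toList ≠ -1
          then "R".toList else "".toList)
        = (if PySem.Chars.isIn "Rgt tfc".toList (PySem.Chars.slice cs (some (i : Int))
          (some (PySem.Chars.findFrom cs "\n".toList ((i : Int) + 1)))) then "R".toList else "".toList) :=
      if_congr ((PySem.Chars.find_ne_neg_one_iff _ _).trans
        (PySem.Chars.isIn_iff_infix _ _).symm) rfl rfl
    rw [htfc]
  · rw [if_neg (fun hB => hC ⟨hdash.2 hB.1, hcolon.2 hB.2⟩), if_neg hC]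

-- the main loop correspondence: A's jump scan from the first match ≥ k equals B's scan of [k, n)
theorem pv_main (cs : List Char) : ∀ (fuel : Nat) (k : Nat) (d : pvDictT),
    k ≤ cs.length → cs.length + 1 - k ≤ fuel →
    pvLoopA cs fuel (PySem.Chars.findFrom cs "\nRWY".toList (k : Int)) d =
      (PySem.List.pyRange (k : Int) (cs.length : Int) 1).foldl (pvStepB cs) d := by
  intro fuel
  induction fuel with
  | zero => intro k d hk hf; omega
  | succ fuel ih =>
    intro k d hk hf
    by_cases hm : PySem.Chars.findFrom cs "\nRWY".toList (k : Int) = -1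
    · rw [hm]
      have hnomatch : ∀ p : Nat, k ≤ p → ¬ "\nRWY".toList <+: cs.drop p := by
        intro p hp hpre
        rw [PySem.Chars.findFrom_natCast_eq_neg_one_iff cs _ k hk, pv_infix_drop_iff] at hm
        exact hm ⟨p, hp, hpre⟩
      have hL : pvLoopA cs (fuel + 1) (-1) d = d := by
        simp [pvLoopA]
      rw [hL]
      symm
      apply pv_foldl_id
      intro x hx d'
      rw [PySem.List.mem_pyRange_iff_of_pos (by norm_num)] at hx
      exact pv_stepB_skip cs x (by omega) (hnomatch x.toNat (by omega)) d'
    · obtain ⟨ha, hb, hc⟩ := PySem.Chars.findFrom_natCast_spec cs "\nRWY".toList k hk hm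
      set r := PySem.Chars.findFrom cs "\nRWY".toList (k : Int) with hr
      have hr0 : (0 : Int) ≤ r := le_trans (by positivity) ha
      have hrm : r = (r.toNat : Int) := by omega
      set m := r.toNat with hmdef
      have hkm : k ≤ m := by omega
      have hmlen : m + 4 ≤ cs.length := by
        have hlen := hb.length_le
        rw [List.length_drop] at hlen
        have h4 : ("\nRWY".toList).length = 4 := rfl
        omega
      have hstep : pvLoopA cs (fuel + 1) r d = pvLoopA cs fuel
          (PySem.Chars.findFrom cs "\nRWY".toList (PySem.Chars.findFrom cs "\n".toList (r + 1)))
          (pvBodyA cs r (PySem.Chars.findFrom cs "\n".toList (r + 1)) d) := by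
        conv_lhs => rw [pvLoopA]
        rw [if_neg hm]
      rw [hstep]
      have hcast : r + 1 = ((m + 1 : Nat) : Int) := by omega
      have hm1len : m + 1 ≤ cs.length := by omega
      have hjump : PySem.Chars.findFrom cs "\nRWY".toList
          (PySem.Chars.findFrom cs "\n".toList (r + 1)) =
          PySem.Chars.findFrom cs "\nRWY".toList ((m + 1 : Nat) : Int) := by
        by_cases he : PySem.Chars.findFrom cs "\n".toList (r + 1) = -1
        · rw [he, pv_findFrom_neg_one cs _ (by simp : 2 ≤ ("\nRWY".toList).length)]
          symm
          rw [PySem.Chars.findFrom_natCast_eq_neg_one_iff cs _ (m + 1) hm1len,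
            pv_infix_drop_iff]
          rintro ⟨p, hp, hpre⟩
          rw [hcast, PySem.Chars.findFrom_natCast_eq_neg_one_iff cs _ (m + 1) hm1len,
            pv_infix_drop_iff] at he
          exact he ⟨p, hp, (by decide : "\n".toList <+: "\nRWY".toList).trans hpre⟩
        · rw [hcast] at he ⊢
          obtain ⟨hea, heb, hec⟩ := PySem.Chars.findFrom_natCast_spec cs "\n".toList (m + 1) hm1len he
          set e := PySem.Chars.findFrom cs "\n".toList ((m + 1 : Nat) : Int) with hedef
          have he0 : (0 : Int) ≤ e := le_trans (by positivity) hea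
          have heTN : e = (e.toNat : Int) := by omega
          have heLen : e.toNat < cs.length := by
            have hlen := heb.length_le
            rw [List.length_drop] at hlen
            have h1 : ("\n".toList).length = 1 := rfl
            omega
          rw [heTN]
          apply pv_findFrom_congr cs _ e.toNat (m + 1) (by omega) hm1len
          intro p hpre
          constructor
          · intro hp
            omega
          · intro hp
            by_contra hlt
            exact hec p hp (by omega) ((by decide : "\n".toList <+: "\nRWY".toList).trans hpre)
      rw [hjump]
      rw [ih (m + 1) (pvBodyA cs r (PySem.Chars.findFrom cs "\n".toList (r + 1)) d) hm1len (by omega)]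
      -- right-hand side: split the range at m
      rw [show ((k : Nat) : Int) = (k : Int) from rfl]
      rw [PySem.List.pyRange_one_append (k : Int) (m : Int) (cs.length : Int) (by omega) (by omega),
        List.foldl_append]
      have hskip : (PySem.List.pyRange (k : Int) (m : Int) 1).foldl (pvStepB cs) d = d := by
        apply pv_foldl_id
        intro x hx d'
        rw [PySem.List.mem_pyRange_iff_of_pos (by norm_num)] at hx
        exact pv_stepB_skip cs x (by omega) (fun hpre => hc x.toNat (by omega) (by omega) hpre) d'
      rw [hskip]
      rw [PySem.List.pyRange_one_cons (by omega : (m : Int) < (cs.length : Int))]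
      rw [List.foldl_cons]
      rw [pv_step_eq_body cs m (by omega) hb d]
      have hfix : ((m : Int) + 1) = ((m + 1 : Nat) : Int) := by omega
      rw [hfix, ← hrm, hcast]

-- ===== VERDICT (by name: the statement is the Claim_ definition above) =====
theorem get_rgt_spec : Claim_equal_get_rgt := by
  intro s _
  unfold Spec_get_rgt get_rgt get_rgt_alt
  have h := pv_main s.toList (s.toList.length + 1) 0 PySem.Dict.empty (by omega) (by omega)
  rw [Int.natCast_zero, PySem.Chars.findFrom_zero] at h
  rw [h]
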